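-- pv_equiv track=rewrite | github.com/goabonga/multicz | src/multicz/writers.py | _read_property
-- ===== SOURCE A (Python) =====
-- def _read_property(text: str, key: str) -> str | None:
--     for line in text.splitlines():
--         stripped = line.lstrip()
--         if not stripped or stripped[0] in "#!":
--             continue
--         for sep in ("=", ":"):
--             if sep in stripped:
--                 k, _, v = stripped.partition(sep)
--                 if k.strip() == key:
--                     return v.strip()
--                 break
--     return None
-- ===== SOURCE B (Python) =====
-- def _read_property(text: str, key: str) -> str | None:
--     props = {}
--     for line in text.splitlines():
--         stripped = line.lstrip()
--         if not stripped or stripped[0] in "#!":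
--             continue
--         sep = "=" if "=" in stripped else ":" if ":" in stripped else None
--         if sep is None:
--             continue
--         k, _, v = stripped.partition(sep)
--         props.setdefault(k.strip(), v.strip())
--     return props.get(key)
-- ===== Notes on version B (the rewrite author's own statement) =====
-- stated objective: alternative
-- what changed: A scans line by line and returns at the first matching key; B first parses the whole text into a first-occurrence-wins property dict (setdefault) and then performs a single lookup.
import Mathlib
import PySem

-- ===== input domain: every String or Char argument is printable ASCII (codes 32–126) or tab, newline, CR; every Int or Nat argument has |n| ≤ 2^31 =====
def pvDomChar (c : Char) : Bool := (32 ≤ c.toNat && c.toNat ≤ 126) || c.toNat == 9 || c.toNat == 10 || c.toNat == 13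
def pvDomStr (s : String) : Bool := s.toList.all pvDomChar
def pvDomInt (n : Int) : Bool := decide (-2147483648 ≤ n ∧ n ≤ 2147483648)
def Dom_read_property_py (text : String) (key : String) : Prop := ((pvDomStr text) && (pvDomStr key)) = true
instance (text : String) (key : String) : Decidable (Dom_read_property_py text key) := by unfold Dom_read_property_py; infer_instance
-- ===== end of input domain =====

-- B parses the whole text into a first-occurrence-wins property dict and then looks the key up once,
-- instead of A's early-exit line scan; same cost, different decomposition (return value only, no mutation).

-- s.partition(sep) for a single-character sep, as (before, after) — exact when the middle
-- component is discarded: before = prefix up to the first occurrence (all of s if absent).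
def pvPart (cs : List Char) (sep : Char) : List Char × List Char :=
  (cs.takeWhile (fun c => c ≠ sep), (cs.dropWhile (fun c => c ≠ sep)).drop 1)

-- ===== PORT A =====
-- A's line loop; the inner 'for sep in ("=", ":") … break' is unrolled into its two iterations.
def readPropGoA (lines : List (List Char)) (key : List Char) : Option (List Char) :=
  match lines with
  | [] => none
  | line :: rest =>
    match PySem.Chars.lstrip line with
    | [] => readPropGoA rest key
    | c :: s' =>
      if c = '#' ∨ c = '!' then readPropGoA rest key
      else if PySem.Chars.isIn ['='] (c :: s') then
        let kv := pvPart (c :: s') '='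
        if PySem.Chars.strip kv.1 = key then some (PySem.Chars.strip kv.2)
        else readPropGoA rest key
      else if PySem.Chars.isIn [':'] (c :: s') then
        let kv := pvPart (c :: s') ':'
        if PySem.Chars.strip kv.1 = key then some (PySem.Chars.strip kv.2)
        else readPropGoA rest key
      else readPropGoA rest key

def read_property_py (text : String) (key : String) : Option String :=
  (readPropGoA (PySem.Chars.splitlines text.toList) key.toList).map String.ofList

-- ===== PORT B =====
-- one dict-building step of B's loop body
def readPropStep (d : PySem.Dict (List Char) (List Char)) (line : List Char) :
    PySem.Dict (List Char) (List Char) :=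
  match PySem.Chars.lstrip line with
  | [] => d
  | c :: s' =>
    if c = '#' ∨ c = '!' then d
    else
      let sep? : Option Char :=
        if PySem.Chars.isIn ['='] (c :: s') then some '='
        else if PySem.Chars.isIn [':'] (c :: s') then some ':'
        else none
      match sep? with
      | none => d
      | some sep =>
        let kv := pvPart (c :: s') sep
        d.setdefault (PySem.Chars.strip kv.1) (PySem.Chars.strip kv.2)

def read_property_py_alt (text : String) (key : String) : Option String :=
  (((PySem.Chars.splitlines text.toList).foldl readPropStep PySem.Dict.empty).get?
      key.toList).map String.ofList

-- ===== PRECONDITION & SPEC =====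
def Spec_read_property_py (text : String) (key : String) (out : Option String) : Prop := out = read_property_py_alt text key
instance (text : String) (key : String) (out : Option String) : Decidable (Spec_read_property_py text key out) := by unfold Spec_read_property_py; infer_instance

-- ===== CLAIM (what is proved, stated in full; the proofs are below) =====
def Claim_equal_read_property_py : Prop := ∀ (text : String) (key : String), Dom_read_property_py text key → Spec_read_property_py text key (read_property_py text key)

-- ===== LEMMAS AND PROOFS =====

-- per-line result of A's scan: the value this line yields for 'key', if any
def pvLineVal (line : List Char) (key : List Char) : Option (List Char) :=
  match PySem.Chars.lstrip line with
  | [] => none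
  | c :: s' =>
    if c = '#' ∨ c = '!' then none
    else if PySem.Chars.isIn ['='] (c :: s') then
      (if PySem.Chars.strip (pvPart (c :: s') '=').1 = key
       then some (PySem.Chars.strip (pvPart (c :: s') '=').2) else none)
    else if PySem.Chars.isIn [':'] (c :: s') then
      (if PySem.Chars.strip (pvPart (c :: s') ':').1 = key
       then some (PySem.Chars.strip (pvPart (c :: s') ':').2) else none)
    else none

theorem goA_cons (line : List Char) (rest : List (List Char)) (key : List Char) :
    readPropGoA (line :: rest) key = (pvLineVal line key).or (readPropGoA rest key) := by
  simp only [readPropGoA, pvLineVal]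
  cases hs : PySem.Chars.lstrip line with
  | nil => simp
  | cons c s' =>
    dsimp only
    split_ifs <;> simp

theorem step_get? (d : PySem.Dict (List Char) (List Char)) (line : List Char)
    (key : List Char) :
    (readPropStep d line).get? key = (d.get? key).or (pvLineVal line key) := by
  simp only [readPropStep, pvLineVal]
  cases hs : PySem.Chars.lstrip line with
  | nil => simp
  | cons c s' =>
    dsimp only
    by_cases h1 : c = '#' ∨ c = '!'
    · simp [h1]
    · simp only [h1, if_false]
      by_cases h2 : PySem.Chars.isIn ['='] (c :: s') = true
      · simp only [if_pos h2]
        by_cases hk : PySem.Chars.strip (pvPart (c :: s') '=').1 = key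
        · rw [hk, PySem.Dict.get?_setdefault_self]
          cases d.get? key <;> simp
        · rw [PySem.Dict.get?_setdefault_of_ne d _ (fun h => hk h.symm)]
          simp [hk]
      · simp only [if_neg h2]
        by_cases h3 : PySem.Chars.isIn [':'] (c :: s') = true
        · simp only [if_pos h3]
          by_cases hk : PySem.Chars.strip (pvPart (c :: s') ':').1 = key
          · rw [hk, PySem.Dict.get?_setdefault_self]
            cases d.get? key <;> simp
          · rw [PySem.Dict.get?_setdefault_of_ne d _ (fun h => hk h.symm)]
            simp [hk]
        · simp only [if_neg h3]
          simp

-- loop invariant: the dict built over 'lines' on top of d answers 'key' with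
-- d's binding, else A's first-match scan of lines
theorem readProp_fold_get? (lines : List (List Char)) (key : List Char)
    (d : PySem.Dict (List Char) (List Char)) :
    (lines.foldl readPropStep d).get? key = (d.get? key).or (readPropGoA lines key) := by
  induction lines generalizing d with
  | nil => simp [readPropGoA]
  | cons line rest ih =>
    rw [List.foldl_cons, ih, step_get?, Option.or_assoc, ← goA_cons]

-- ===== VERDICT (by name: the statement is the Claim_ definition above) =====
theorem read_property_py_spec : Claim_equal_read_property_py := by
  intro text key _
  unfold Spec_read_property_py read_property_py read_property_py_alt
  rw [readProp_fold_get?, PySem.Dict.get?_empty, Option.none_or]
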